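-- pv_equiv track=rewrite | github.com/pypi-data/pypi-mirror-79 | packages/jdna/jdna-0.2-py3-none-any.whl/jdna/format.py | number_lines
-- ===== SOURCE A (Python) =====
-- class NumberStrategy:
--     NUM = "line_number"
--     LENGTH = "line_length"
--
-- def number_lines(lines, indent=None, numbering_strategy=NumberStrategy.LENGTH, step=1):
--     if indent is None:
--         indent = 10
--     index = 0
--     indices = []
--     for i, line in enumerate(lines):
--         if i % step == 0:
--             indices.append(index)
--             if numbering_strategy == NumberStrategy.LENGTH:
--                 index += len(line)
--             elif numbering_strategy == NumberStrategy.NUM: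
--                 index += 1
--         else:
--             indices.append("")
--
--     new_lines = []
--     for index, line in zip(indices, lines):
--         index_str = "{0:{fill}{align}{indent}}".format(
--             index, fill=" ", align="<", indent=indent
--         )
--         new_lines.append("{}{}".format(index_str, line))
--     return new_lines
-- ===== SOURCE B (Python) =====
-- def number_lines(lines, indent=None, numbering_strategy="line_length", step=1):
--     # Single pass with a countdown counter instead of enumerate + modulo:
--     # k == 0 marks a numbered line, then k is reset to abs(step); labels are
--     # padded with str.ljust, no intermediate indices table and no format spec.
--     if indent is None:
--         indent = 10
--     out = []
--     acc = 0
--     k = 0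
--     for line in lines:
--         if k == 0:
--             label = str(acc)
--             if numbering_strategy == "line_length":
--                 acc += len(line)
--             elif numbering_strategy == "line_number":
--                 acc += 1
--             k = abs(step)
--         else:
--             label = ""
--         out.append(label.ljust(indent) + line)
--         k -= 1
--     return out
-- ===== Notes on version B (the rewrite author's own statement) =====
-- stated objective: simpler
-- what changed: Replaces A's two staged passes (build an indices table with enumerate and i % step, then zip it with lines and format) by one pass over the lines themselves with a countdown counter (k == 0 marks a numbered line, reset to abs(step)) and a running accumulator, padding each label with str.ljust; no index arithmetic, no intermediate table, no format-spec machinery. …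
-- outside the precondition, e.g. on number_lines(['a'], -2, 'line_length', 1): A returns ['0 a'], B returns ['0a']
import Mathlib
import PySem

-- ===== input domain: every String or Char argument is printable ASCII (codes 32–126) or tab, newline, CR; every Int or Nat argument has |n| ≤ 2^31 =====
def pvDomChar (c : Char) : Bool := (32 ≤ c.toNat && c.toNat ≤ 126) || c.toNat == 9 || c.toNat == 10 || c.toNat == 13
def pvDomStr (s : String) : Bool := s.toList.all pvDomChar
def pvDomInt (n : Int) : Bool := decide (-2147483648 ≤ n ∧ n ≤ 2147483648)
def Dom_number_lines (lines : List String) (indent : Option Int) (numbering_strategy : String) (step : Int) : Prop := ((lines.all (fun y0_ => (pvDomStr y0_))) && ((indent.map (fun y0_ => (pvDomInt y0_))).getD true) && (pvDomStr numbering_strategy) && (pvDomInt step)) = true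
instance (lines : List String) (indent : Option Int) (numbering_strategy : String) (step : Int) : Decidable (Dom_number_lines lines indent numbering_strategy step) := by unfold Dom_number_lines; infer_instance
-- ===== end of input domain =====

-- ===== PORT A =====
-- B is a single countdown-counter pass that pads with str.ljust instead of A's
-- two staged passes (indices table, then zip + format spec); return values agree on Pre_.

-- '"{0:{fill}{align}{indent}}".format(index, fill=" ", align="<", indent=indent)':
-- str(index) (or "") left-aligned, space-padded.  For an int a negative indent's minus sign is
-- read as a sign directive and the digits as the width, so the width is |indent|; for the
-- string "" a negative indent raises ValueError in Python (excluded by Pre_), here it pads by 0.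
def pvFormatA (idx : Option Int) (w : Int) : String :=
  match idx with
  | some n =>
    let s := PySem.Int.toStr n
    s ++ String.mk (List.replicate ((w.natAbs : Int) - PySem.Str.len s).toNat ' ')
  | none => "" ++ String.mk (List.replicate (w - PySem.Str.len "").toNat ' ')

def number_lines (lines : List String) (indent : Option Int) (numbering_strategy : String) (step : Int) : List String :=
  let ind : Int := match indent with | none => 10 | some v => v
  -- pass 1: build the indices table (none = Python's "")
  let indices :=
    ((PySem.List.enumerate lines 0).foldl
      (fun (st : Int × List (Option Int)) p =>
        if PySem.Int.mod p.1 step == 0 then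
          (if numbering_strategy == "line_length" then st.1 + PySem.Str.len p.2
           else if numbering_strategy == "line_number" then st.1 + 1
           else st.1,
           st.2 ++ [some st.1])
        else (st.1, st.2 ++ [none]))
      (0, [])).2
  -- pass 2: zip indices with lines and format
  (indices.zip lines).foldl (fun acc q => acc ++ [pvFormatA q.1 ind ++ q.2]) []

-- ===== PORT B =====
-- str.ljust(w): pad on the right with spaces to width w (no-op if already that long).
def pvLjust (s : String) (w : Int) : String :=
  s ++ String.mk (List.replicate (w - PySem.Str.len s).toNat ' ')

def number_lines_alt (lines : List String) (indent : Option Int) (numbering_strategy : String) (step : Int) : List String :=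
  let ind : Int := match indent with | none => 10 | some v => v
  (lines.foldl
    (fun (st : Int × Int × List String) line =>
      let (acc, k, out) := st
      if k == 0 then
        let label := PySem.Int.toStr acc
        let acc' := if numbering_strategy == "line_length" then acc + PySem.Str.len line
                    else if numbering_strategy == "line_number" then acc + 1
                    else acc
        (acc', (step.natAbs : Int) - 1, out ++ [pvLjust label ind ++ line])
      else (acc, k - 1, out ++ [pvLjust "" ind ++ line]))
    (0, 0, [])).2.2

-- ===== PRECONDITION & SPEC =====
-- Pre_ excludes (a) step = 0 with nonempty lines, where A raises ZeroDivisionError, and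
-- (b) negative indent, where A raises ValueError on blank labels and on numbered labels the
-- format spec reads the minus sign as a sign directive while B's ljust pads by nothing —
-- a corner no caller specifies, on which either width is defensible.
def Pre_number_lines (lines : List String) (indent : Option Int) (numbering_strategy : String) (step : Int) : Prop :=
  (step ≠ 0 ∨ lines = []) ∧ 0 ≤ (indent.getD 10)
instance (lines : List String) (indent : Option Int) (numbering_strategy : String) (step : Int) : Decidable (Pre_number_lines lines indent numbering_strategy step) := by unfold Pre_number_lines; infer_instance

def pvWitness_number_lines : List String × Option Int × String × Int := (["ab", "c"], none, "line_length", 1)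

def Spec_number_lines (lines : List String) (indent : Option Int) (numbering_strategy : String) (step : Int) (out : List String) : Prop := out = number_lines_alt lines indent numbering_strategy step
instance (lines : List String) (indent : Option Int) (numbering_strategy : String) (step : Int) (out : List String) : Decidable (Spec_number_lines lines indent numbering_strategy step out) := by unfold Spec_number_lines; infer_instance

-- ===== CLAIM (what is proved, stated in full; the proofs are below) =====
def Claim_equal_number_lines : Prop := ∀ (lines : List String) (indent : Option Int) (numbering_strategy : String) (step : Int), Dom_number_lines lines indent numbering_strategy step → Pre_number_lines lines indent numbering_strategy step → Spec_number_lines lines indent numbering_strategy step (number_lines lines indent numbering_strategy step)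

-- ===== LEMMAS AND PROOFS =====

-- the per-step increment of the accumulator
def pvDelta (ns : String) (l : String) : Int :=
  if ns == "line_length" then PySem.Str.len l
  else if ns == "line_number" then 1 else 0

-- reference recursion (A's fused behaviour, indexed by i with the mod test)
def pvGo (ns : String) (step w : Int) : Int → Int → List String → List String
  | _, _, [] => []
  | i, acc, l :: ls =>
    if PySem.Int.mod i step == 0 then
      (pvLjust (PySem.Int.toStr acc) w ++ l) :: pvGo ns step w (i + 1) (acc + pvDelta ns l) ls
    else (pvLjust "" w ++ l) :: pvGo ns step w (i + 1) acc ls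

-- A's indices table, as a recursion
def pvIdxA (ns : String) (step : Int) : Int → Int → List String → List (Option Int)
  | _, _, [] => []
  | i, acc, l :: ls =>
    if PySem.Int.mod i step == 0 then some acc :: pvIdxA ns step (i + 1) (acc + pvDelta ns l) ls
    else none :: pvIdxA ns step (i + 1) acc ls

theorem pvFormatA_some (n w : Int) (hw : 0 ≤ w) :
    pvFormatA (some n) w = pvLjust (PySem.Int.toStr n) w := by
  simp [pvFormatA, pvLjust, Int.natAbs_of_nonneg hw]
theorem pvFormatA_none (w : Int) : pvFormatA none w = pvLjust "" w := rfl

theorem pvInc (ns l : String) (acc : Int) :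
    (if ns == "line_length" then acc + PySem.Str.len l
     else if ns == "line_number" then acc + 1 else acc) = acc + pvDelta ns l := by
  unfold pvDelta; split_ifs <;> omega

theorem pvA_loop1 (ns : String) (step : Int) (ls : List String) :
    ∀ (i : Int) (st : Int × List (Option Int)),
    (((PySem.List.enumerate ls i).foldl
      (fun (st : Int × List (Option Int)) p =>
        if PySem.Int.mod p.1 step == 0 then
          (if ns == "line_length" then st.1 + PySem.Str.len p.2
           else if ns == "line_number" then st.1 + 1
           else st.1,
           st.2 ++ [some st.1])
        else (st.1, st.2 ++ [none]))
      st).2) = st.2 ++ pvIdxA ns step i st.1 ls := by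
  induction ls with
  | nil => intro i st; simp [PySem.List.enumerate_nil, pvIdxA]
  | cons l ls ih =>
    intro i st
    rw [PySem.List.enumerate_cons, List.foldl_cons, ih]
    by_cases h : PySem.Int.mod i step == 0
    · simp only [pvInc]; simp [pvIdxA, h]
    · simp [pvIdxA, h]

theorem pvA_loop2 (w : Int) (idxs : List (Option Int)) (ls : List String) :
    ∀ (init : List String),
    ((idxs.zip ls).foldl (fun acc q => acc ++ [pvFormatA q.1 w ++ q.2]) init)
      = init ++ (idxs.zip ls).map (fun q => pvFormatA q.1 w ++ q.2) := by
  induction idxs.zip ls with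
  | nil => intro init; simp
  | cons q qs ih => intro init; simp [ih]

theorem pvIdxA_zip_map (ns : String) (step w : Int) (hw : 0 ≤ w) (ls : List String) :
    ∀ (i acc : Int),
    ((pvIdxA ns step i acc ls).zip ls).map (fun q => pvFormatA q.1 w ++ q.2)
      = pvGo ns step w i acc ls := by
  induction ls with
  | nil => intro i acc; simp [pvIdxA, pvGo]
  | cons l ls ih =>
    intro i acc
    by_cases h : PySem.Int.mod i step == 0
    · simp [pvIdxA, pvGo, h, ih, pvFormatA_some _ _ hw]
    · simp [pvIdxA, pvGo, h, ih, pvFormatA_none]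

-- B's loop as a recursion on (acc, countdown k)
def pvB (ns : String) (step w : Int) : Int → Int → List String → List String
  | _, _, [] => []
  | acc, k, l :: ls =>
    if k == 0 then
      (pvLjust (PySem.Int.toStr acc) w ++ l) :: pvB ns step w (acc + pvDelta ns l) ((step.natAbs : Int) - 1) ls
    else (pvLjust "" w ++ l) :: pvB ns step w acc (k - 1) ls

-- the step function of number_lines_alt's foldl (definitionally equal to its lambda)
def pvBStep (ns : String) (step w : Int) (st : Int × Int × List String) (line : String) : Int × Int × List String :=
  let (acc, k, out) := st
  if k == 0 then
    let label := PySem.Int.toStr acc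
    let acc' := if ns == "line_length" then acc + PySem.Str.len line
                else if ns == "line_number" then acc + 1
                else acc
    (acc', (step.natAbs : Int) - 1, out ++ [pvLjust label w ++ line])
  else (acc, k - 1, out ++ [pvLjust "" w ++ line])

theorem pvB_loop (ns : String) (step w : Int) (ls : List String) :
    ∀ (acc k : Int) (out : List String),
    ((ls.foldl (pvBStep ns step w) (acc, k, out)).2.2) = out ++ pvB ns step w acc k ls := by
  induction ls with
  | nil => intro acc k out; simp [pvB]
  | cons l ls ih =>
    intro acc k out
    rw [List.foldl_cons]
    by_cases hk : k = 0
    · subst hk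
      rw [show pvBStep ns step w (acc, 0, out) l
            = (acc + pvDelta ns l, (step.natAbs : Int) - 1,
               out ++ [pvLjust (PySem.Int.toStr acc) w ++ l]) from by
            simp only [pvBStep]; split_ifs <;> simp_all [pvDelta, PySem.Str.len],
          ih, pvB]
      simp
    · rw [show pvBStep ns step w (acc, k, out) l
            = (acc, k - 1, out ++ [pvLjust "" w ++ l]) from by simp [pvBStep, hk],
          ih, pvB, if_neg (show ¬((k == 0) = true) from by simp [hk])]
      simp

theorem pvMod_zero_iff (i step : Int) :
    PySem.Int.mod i step = 0 ↔ ((step.natAbs : Int)) ∣ i := by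
  rw [PySem.Int.mod_eq_zero_iff_dvd, Int.natAbs_dvd]

-- countdown invariant: 0 ≤ k < |step| and |step| ∣ i + k; then k = 0 ↔ i % step == 0
theorem pvB_eq_pvGo (ns : String) (step w : Int) (ls : List String) :
    ∀ (i k acc : Int), 0 ≤ k → k < (step.natAbs : Int) → (step.natAbs : Int) ∣ (i + k) →
    pvB ns step w acc k ls = pvGo ns step w i acc ls := by
  induction ls with
  | nil => intro i k acc _ _ _; simp [pvB, pvGo]
  | cons l ls ih =>
    intro i k acc hk0 hks hdvd
    by_cases hk : k = 0
    · subst hk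
      have hdi : ((step.natAbs : Int)) ∣ i := by simpa using hdvd
      have hmz : (PySem.Int.mod i step == 0) = true := by
        simp [pvMod_zero_iff i step |>.2 hdi]
      rw [pvB, if_pos (show ((0:Int) == 0) = true from by decide), pvGo, if_pos hmz]
      congr 1
      refine ih (i + 1) ((step.natAbs : Int) - 1) _ (by omega) (by omega) ?_
      have h : i + 1 + ((step.natAbs : Int) - 1) = i + (step.natAbs : Int) := by ring
      rw [h]
      exact Dvd.dvd.add hdi (dvd_refl _)
    · have hndi : ¬ ((step.natAbs : Int)) ∣ i := by
        intro hdi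
        have hdk : ((step.natAbs : Int)) ∣ k := (Int.dvd_add_right hdi).1 hdvd
        have := Int.le_of_dvd (by omega) hdk
        omega
      have hmz : (PySem.Int.mod i step == 0) = false := by
        simp only [beq_eq_false_iff_ne, ne_eq, pvMod_zero_iff]
        exact hndi
      rw [pvB, if_neg (show ¬((k == 0) = true) from by simp [hk]), pvGo, if_neg (by simp [hmz])]
      congr 1
      refine ih (i + 1) (k - 1) _ (by omega) (by omega) ?_
      have h : i + 1 + (k - 1) = i + k := by ring
      rw [h]; exact hdvd

-- the whole equivalence for an explicit indent value
theorem pvCore (lines : List String) (ns : String) (step ind : Int)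
    (hw : 0 ≤ ind) (h1 : step ≠ 0 ∨ lines = []) :
    ((((PySem.List.enumerate lines 0).foldl
        (fun (st : Int × List (Option Int)) p =>
          if PySem.Int.mod p.1 step == 0 then
            (if ns == "line_length" then st.1 + PySem.Str.len p.2
             else if ns == "line_number" then st.1 + 1
             else st.1,
             st.2 ++ [some st.1])
          else (st.1, st.2 ++ [none]))
        (0, [])).2.zip lines).foldl (fun acc q => acc ++ [pvFormatA q.1 ind ++ q.2]) [])
      = (lines.foldl (pvBStep ns step ind) (0, 0, [])).2.2 := by
  rcases h1 with hstep | hnil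
  · have hs : 0 < (step.natAbs : Int) := by
      have := Int.natAbs_pos.2 hstep; exact_mod_cast this
    rw [pvA_loop1, List.nil_append, pvA_loop2, List.nil_append, pvIdxA_zip_map _ _ _ hw,
      pvB_loop, List.nil_append, pvB_eq_pvGo ns step _ lines 0 0 0 le_rfl hs (by simp)]
  · subst hnil; rfl

-- ===== VERDICT (by name: the statement is the Claim_ definition above) =====
theorem number_lines_spec : Claim_equal_number_lines := by
  intro lines indent ns step _ hpre
  unfold Spec_number_lines number_lines number_lines_alt
  cases indent with
  | none => exact pvCore lines ns step 10 (by norm_num) hpre.1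
  | some v => exact pvCore lines ns step v (by simpa using hpre.2) hpre.1
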